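-- pv_equiv track=rewrite | github.com/massimopiazza/booKR | src/markdown_exporter.py | sanitize_frontmatter
-- ===== SOURCE A (Python) =====
-- def sanitize_frontmatter(text: str) -> str:
--     if not text:
--         return ""
--     replacements = {
--         ":": " -",
--         "[": "(",
--         "]": ")",
--         "{": "(",
--         "}": ")",
--         "#": "",
--         "|": "-",
--         ">": "-",
--         "\\": "/",
--         "\n": " ",
--         "\r": " ",
--     }
--     result = str(text)
--     for char, replacement in replacements.items():
--         result = result.replace(char, replacement)
--     return " ".join(result.split()).strip()
-- ===== SOURCE B (Python) =====
-- def sanitize_frontmatter(text: str) -> str: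
--     if not text:
--         return ""
--     mapping = {
--         ":": " -",
--         "[": "(",
--         "]": ")",
--         "{": "(",
--         "}": ")",
--         "#": "",
--         "|": "-",
--         ">": "-",
--         "\\": "/",
--         "\n": " ",
--         "\r": " ",
--     }
--     result = "".join(mapping.get(ch, ch) for ch in str(text))
--     return " ".join(result.split()).strip()
-- ===== Notes on version B (the rewrite author's own statement) =====
-- stated objective: idiomatic
-- what changed: Replaces the loop of 11 sequential whole-string str.replace passes by a single character-level pass that maps each character through a lookup dict, then the same whitespace normalization.
import Mathlib
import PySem

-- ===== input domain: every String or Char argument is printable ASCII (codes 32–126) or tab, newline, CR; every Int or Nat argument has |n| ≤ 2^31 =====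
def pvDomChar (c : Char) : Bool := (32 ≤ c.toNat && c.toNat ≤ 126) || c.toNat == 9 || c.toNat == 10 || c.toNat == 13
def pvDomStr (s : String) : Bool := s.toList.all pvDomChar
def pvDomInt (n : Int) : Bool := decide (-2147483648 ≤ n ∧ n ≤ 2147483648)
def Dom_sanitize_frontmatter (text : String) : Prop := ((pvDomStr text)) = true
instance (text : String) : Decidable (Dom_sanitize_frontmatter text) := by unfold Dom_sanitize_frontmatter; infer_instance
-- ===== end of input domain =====

-- B changes: one character-level pass through a lookup table instead of 11 sequential whole-string replaces (idiomatic).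

-- ===== PORT A =====
-- the literal replacements dict, in insertion order (single-char keys)
def sfRepls : List (List Char × List Char) :=
  [([':'], [' ', '-']), (['['], ['(']), ([']'], [')']), (['{'], ['(']), (['}'], [')']),
   (['#'], []), (['|'], ['-']), (['>'], ['-']), (['\\'], ['/']), (['\n'], [' ']), (['\r'], [' '])]

def sanitize_frontmatter (text : String) : String :=
  if text = "" then ""
  else
    let result := sfRepls.foldl (fun r p => PySem.Chars.replace r p.1 p.2) text.toList
    String.ofList (PySem.Chars.strip (PySem.Chars.join [' '] (PySem.Chars.split₀ result)))

-- ===== PORT B =====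
-- mapping.get(ch, ch): the per-character lookup table
def sfMap (c : Char) : List Char :=
  if c = ':' then [' ', '-']
  else if c = '[' then ['(']
  else if c = ']' then [')']
  else if c = '{' then ['(']
  else if c = '}' then [')']
  else if c = '#' then []
  else if c = '|' then ['-']
  else if c = '>' then ['-']
  else if c = '\\' then ['/']
  else if c = '\n' then [' ']
  else if c = '\r' then [' ']
  else [c]

def sanitize_frontmatter_alt (text : String) : String :=
  if text = "" then ""
  else
    let result := text.toList.flatMap sfMap
    String.ofList (PySem.Chars.strip (PySem.Chars.join [' '] (PySem.Chars.split₀ result)))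

-- ===== PRECONDITION & SPEC =====
def Spec_sanitize_frontmatter (text : String) (out : String) : Prop := out = sanitize_frontmatter_alt text
instance (text : String) (out : String) : Decidable (Spec_sanitize_frontmatter text out) := by unfold Spec_sanitize_frontmatter; infer_instance

-- ===== CLAIM (what is proved, stated in full; the proofs are below) =====
def Claim_equal_sanitize_frontmatter : Prop := ∀ (text : String), Dom_sanitize_frontmatter text → Spec_sanitize_frontmatter text (sanitize_frontmatter text)

-- ===== LEMMAS AND PROOFS =====

-- single-character replace is a flatMap over the characters
theorem replace_go_single (c : Char) (new : List Char) :
    ∀ (fuel : Nat) (l acc : List Char), l.length ≤ fuel →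
      PySem.Chars.replace.go [c] new fuel l acc
        = acc.reverse ++ l.flatMap (fun x => if x = c then new else [x]) := by
  intro fuel
  induction fuel with
  | zero =>
    intro l acc h
    have : l = [] := List.eq_nil_of_length_eq_zero (Nat.le_zero.mp h)
    subst this
    simp [PySem.Chars.replace.go]
  | succ n ih =>
    intro l acc h
    cases l with
    | nil => simp [PySem.Chars.replace.go]
    | cons x t =>
      simp only [PySem.Chars.replace.go]
      by_cases hx : x = c
      · subst hx
        have hpre : [x].isPrefixOf (x :: t) = true := by simp [List.isPrefixOf]
        rw [if_pos hpre]
        simp only [List.length_cons] at h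
        rw [ih _ _ (by simpa using Nat.le_of_succ_le_succ h)]
        simp
      · have hpre : [c].isPrefixOf (x :: t) = false := by
          simp [List.isPrefixOf]; exact fun hh => (hx hh.symm).elim
        rw [if_neg (by simp [hpre])]
        simp only [List.length_cons] at h
        rw [ih _ _ (Nat.le_of_succ_le_succ h)]
        simp [hx]

theorem replace_single (c : Char) (new cs : List Char) :
    PySem.Chars.replace cs [c] new = cs.flatMap (fun x => if x = c then new else [x]) := by
  unfold PySem.Chars.replace
  simp only [List.isEmpty_cons, if_false, Bool.false_eq_true]
  exact replace_go_single c new cs.length cs [] (le_refl _)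

theorem chain_eq_flatMap (cs : List Char) :
    sfRepls.foldl (fun r p => PySem.Chars.replace r p.1 p.2) cs = cs.flatMap sfMap := by
  simp only [sfRepls, List.foldl, replace_single, List.flatMap_assoc]
  apply List.flatMap_congr
  intro x _
  by_cases h1 : x = ':'
  · subst h1; rfl
  · simp only [if_neg h1, List.flatMap_cons, List.flatMap_nil, List.append_nil]
    by_cases h2 : x = '['
    · subst h2; rfl
    · simp only [if_neg h2, List.flatMap_cons, List.flatMap_nil, List.append_nil]
      by_cases h3 : x = ']'
      · subst h3; rfl
      · simp only [if_neg h3, List.flatMap_cons, List.flatMap_nil, List.append_nil]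
        by_cases h4 : x = '{'
        · subst h4; rfl
        · simp only [if_neg h4, List.flatMap_cons, List.flatMap_nil, List.append_nil]
          by_cases h5 : x = '}'
          · subst h5; rfl
          · simp only [if_neg h5, List.flatMap_cons, List.flatMap_nil, List.append_nil]
            by_cases h6 : x = '#'
            · subst h6; rfl
            · simp only [if_neg h6, List.flatMap_cons, List.flatMap_nil, List.append_nil]
              by_cases h7 : x = '|'
              · subst h7; rfl
              · simp only [if_neg h7, List.flatMap_cons, List.flatMap_nil, List.append_nil]
                by_cases h8 : x = '>'
                · subst h8; rfl
                · simp only [if_neg h8, List.flatMap_cons, List.flatMap_nil, List.append_nil]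
                  by_cases h9 : x = '\\'
                  · subst h9; rfl
                  · simp only [if_neg h9, List.flatMap_cons, List.flatMap_nil, List.append_nil]
                    by_cases h10 : x = '\n'
                    · subst h10; rfl
                    · simp only [if_neg h10, List.flatMap_cons, List.flatMap_nil, List.append_nil]
                      by_cases h11 : x = '\r'
                      · subst h11; rfl
                      · simp only [if_neg h11, List.flatMap_cons, List.flatMap_nil, List.append_nil]
                        simp [sfMap, h1, h2, h3, h4, h5, h6, h7, h8, h9, h10, h11]

-- ===== VERDICT (by name: the statement is the Claim_ definition above) =====
theorem sanitize_frontmatter_spec : Claim_equal_sanitize_frontmatter := by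
  intro text _
  unfold Spec_sanitize_frontmatter sanitize_frontmatter sanitize_frontmatter_alt
  by_cases h : text = ""
  · simp [h]
  · simp only [h, if_false]
    rw [chain_eq_flatMap]
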